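-- pv_equiv track=rewrite | github.com/LegnaPetiteTour/Miktos-Agentic-System | scripts/pearl_control.py | _resolve_layout
-- ===== SOURCE A (Python) =====
-- def _resolve_layout(
--     layouts: list[dict], query: str
-- ) -> dict | None:
--     """
--     Resolve a layout name or ID from a list of layout dicts.
--
--     Resolution order:
--       1. Exact ID match (case-sensitive)
--       2. Exact name match (case-insensitive)
--       3. First substring name match (case-insensitive)
--
--     Returns the matching layout dict, or None if no match.
--     """
--     q_lower = query.lower()
--
--     # Exact ID
--     for layout in layouts:
--         if layout.get("id") == query:
--             return layout
--
--     # Exact name (case-insensitive)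
--     for layout in layouts:
--         if layout.get("name", "").lower() == q_lower:
--             return layout
--
--     # Substring
--     for layout in layouts:
--         if q_lower in layout.get("name", "").lower():
--             return layout
--
--     return None
-- ===== SOURCE B (Python) =====
-- def _resolve_layout(
--     layouts: list[dict], query: str
-- ) -> dict | None:
--     """Single pass: return eagerly on exact ID match; remember the first
--     exact-name and first substring matches and pick them by priority at the end."""
--     q_lower = query.lower()
--     name_hit = None
--     sub_hit = None
--     for layout in layouts:
--         if layout.get("id") == query:
--             return layout
--         nm = layout.get("name", "").lower()
--         if name_hit is None and nm == q_lower: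
--             name_hit = layout
--         if sub_hit is None and q_lower in nm:
--             sub_hit = layout
--     return name_hit if name_hit is not None else sub_hit
-- ===== Notes on version B (the rewrite author's own statement) =====
-- stated objective: alternative
-- what changed: Replaced A's three sequential scans over the layout list by a single pass that returns eagerly on an ID match and records the first exact-name and first substring matches in two slots, choosing by priority at the end.
import Mathlib
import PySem

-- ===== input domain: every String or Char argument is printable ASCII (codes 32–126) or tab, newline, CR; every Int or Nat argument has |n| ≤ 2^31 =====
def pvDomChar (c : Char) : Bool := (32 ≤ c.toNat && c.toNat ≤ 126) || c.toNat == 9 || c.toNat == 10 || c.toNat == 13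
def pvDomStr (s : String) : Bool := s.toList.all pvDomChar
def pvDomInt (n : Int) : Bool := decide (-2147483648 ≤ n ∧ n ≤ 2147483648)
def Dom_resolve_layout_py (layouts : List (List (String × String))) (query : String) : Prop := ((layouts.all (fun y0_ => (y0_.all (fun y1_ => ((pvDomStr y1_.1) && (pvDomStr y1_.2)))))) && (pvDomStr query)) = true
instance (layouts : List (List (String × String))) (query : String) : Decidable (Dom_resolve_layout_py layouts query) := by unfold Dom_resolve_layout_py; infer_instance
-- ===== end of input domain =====

-- ===== PORT A =====
-- B: one pass with an early ID return and two first-match slots instead of A's three sequential scans (same cost, different decomposition).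
def resolve_layout_py (layouts : List (List (String × String))) (query : String) : Option (List (String × String)) :=
  let q_lower := PySem.Str.lower query
  -- for layout in layouts: if layout.get("id") == query: return layout
  match layouts.find? (fun layout => (PySem.Dict.mk layout).get? "id" == some query) with
  | some layout => some layout
  | none =>
    -- for layout in layouts: if layout.get("name","").lower() == q_lower: return layout
    match layouts.find? (fun layout => PySem.Str.lower ((PySem.Dict.mk layout).getD "name" "") == q_lower) with
    | some layout => some layout
    | none =>
      -- for layout in layouts: if q_lower in layout.get("name","").lower(): return layout
      match layouts.find? (fun layout => PySem.Str.isIn q_lower (PySem.Str.lower ((PySem.Dict.mk layout).getD "name" ""))) with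
      | some layout => some layout
      | none => none

-- ===== PORT B =====
-- the single for-loop of Source B: early return on ID, two first-match slots
def pvAltLoop (query q_lower : String) :
    List (List (String × String)) → Option (List (String × String)) → Option (List (String × String)) → Option (List (String × String))
  | [], name_hit, sub_hit => match name_hit with | some l => some l | none => sub_hit
  | layout :: rest, name_hit, sub_hit =>
    if (PySem.Dict.mk layout).get? "id" == some query then some layout
    else
      let nm := PySem.Str.lower ((PySem.Dict.mk layout).getD "name" "")
      pvAltLoop query q_lower rest
        (if name_hit.isNone && (nm == q_lower) then some layout else name_hit)
        (if sub_hit.isNone && PySem.Str.isIn q_lower nm then some layout else sub_hit)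

def resolve_layout_py_alt (layouts : List (List (String × String))) (query : String) : Option (List (String × String)) :=
  pvAltLoop query (PySem.Str.lower query) layouts none none

-- ===== PRECONDITION & SPEC =====
def Spec_resolve_layout_py (layouts : List (List (String × String))) (query : String) (out : Option (List (String × String))) : Prop := out = resolve_layout_py_alt layouts query
instance (layouts : List (List (String × String))) (query : String) (out : Option (List (String × String))) : Decidable (Spec_resolve_layout_py layouts query out) := by unfold Spec_resolve_layout_py; infer_instance

-- ===== CLAIM (what is proved, stated in full; the proofs are below) =====
def Claim_equal_resolve_layout_py : Prop := ∀ (layouts : List (List (String × String))) (query : String), Dom_resolve_layout_py layouts query → Spec_resolve_layout_py layouts query (resolve_layout_py layouts query)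

-- ===== LEMMAS AND PROOFS =====
-- characterisation of B's loop as three find?s, by induction on the list
theorem pvAltLoop_eq (query q_lower : String) (xs : List (List (String × String)))
    (n s : Option (List (String × String))) :
    pvAltLoop query q_lower xs n s =
      ((xs.find? (fun l => (PySem.Dict.mk l).get? "id" == some query)).or
        ((n.or (xs.find? (fun l => PySem.Str.lower ((PySem.Dict.mk l).getD "name" "") == q_lower))).or
          (s.or (xs.find? (fun l => PySem.Str.isIn q_lower (PySem.Str.lower ((PySem.Dict.mk l).getD "name" ""))))))) := by
  induction xs generalizing n s with
  | nil => cases n <;> cases s <;> simp [pvAltLoop]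
  | cons l rest ih =>
    by_cases hid : ((PySem.Dict.mk l).get? "id" == some query) = true
    · simp [pvAltLoop, hid]
    · rw [show pvAltLoop query q_lower (l :: rest) n s = pvAltLoop query q_lower rest
        (if n.isNone && (PySem.Str.lower ((PySem.Dict.mk l).getD "name" "") == q_lower) then some l else n)
        (if s.isNone && PySem.Str.isIn q_lower (PySem.Str.lower ((PySem.Dict.mk l).getD "name" "")) then some l else s)
        from by simp [pvAltLoop, hid]]
      rw [ih]
      simp only [List.find?_cons, hid]
      cases n <;> cases s <;>
        by_cases hn : (PySem.Str.lower ((PySem.Dict.mk l).getD "name" "") == q_lower) = true <;>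
        by_cases hs : PySem.Chars.isIn q_lower.toList (PySem.Chars.lower ((PySem.Dict.mk l).getD "name" "").toList) = true <;>
        simp [hn, hs, Option.or, PySem.Str.isIn]

-- ===== VERDICT (by name: the statement is the Claim_ definition above) =====
theorem resolve_layout_py_spec : Claim_equal_resolve_layout_py := by
  intro layouts query _
  unfold Spec_resolve_layout_py resolve_layout_py resolve_layout_py_alt
  rw [pvAltLoop_eq]
  simp only [Option.none_or]
  split
  · rename_i l h; rw [h]; rfl
  · rename_i h; rw [h, Option.none_or]
    split
    · rename_i l h2; rw [h2]; rfl
    · rename_i h2; rw [h2, Option.none_or]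
      split <;> rename_i h3 <;> simp only [PySem.Str.isIn, PySem.Str.toList_lower] at h3 <;> simp [h3]
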